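-- pv_equiv track=rewrite | github.com/charliedigby/CU-Lyrics | Lyrics_manager.py | contentsList
-- ===== SOURCE A (Python) =====
-- def contentsList(section,entries,sectionAbbr):
--     e=entries
--     if len(e)==0:
--         return ""#if no entries, don't make contents page
--     A=9
--     B=8#these variables hold max number of entries in each column
--     text="\\section{ "+sectionAbbr+" }\n\n"  #section name becomes navigation button in top bar
--     text+="\\begin{frame}[t]{"+section+"}\n"  #frame title appears at top of first page of conntents
--     while e:
--         text+="\\begin{columns}[t]\n\\column{0.05\\textwidth}\n\\column{0.45\\textwidth}\n"
--         text+="\\begin{itemize}\n"""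
--         if len(e)<A+B:
--             A=int((len(e)+1)/2)
--             B=int(len(e)/2)#if slide underful, evenly distribute between columns
--         elif A+B<len(e)<A+B+4:
--             A=A-1
--             B=B-1#ensures next slide never has less than 3 entries- slightly evens distribution between slides
--         for entry in range(A):
--             if e: text+=e.pop(0)+"\n"
--             else: text+="    \\item[] \\phantom{1}\n" #fill space with phantom elements to maintain consistent format
--         text+="    \\item[] \\phantom{1}\n\\end{itemize}\n"
--         text+="\\column{0.45\\textwidth}\n"
--         text+="\\begin{itemize}\n"
--         for entry in range(B):
--             if e: text+=e.pop(0)+"\n"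
--             else: text+="    \\item[] \\phantom{1}\n"
--         if e:
--             text+="    \\item[] \\textit{Continued on next slide...}\n"
--             text+="\\end{itemize}\n\\column{0.05\\textwidth}\n\\end{columns}\n"
--             text+="\\end{frame}\n\\begin{frame}[t]\n"
--
--         else: text+="    \\item[] \\phantom{1}\n"
--         A=11
--         B=10#maximum lengths of columns for subsequent slides of contents (longer due to lack of header)
--     text+="\\end{itemize}\n\\column{0.05\\textwidth}\n"
--     text+="\\end{columns}\n\\end{frame}\n\n"
--     return text
-- ===== SOURCE B (Python) =====
-- # Plan-then-render rewrite: a planning pass over the entry COUNT computes each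
-- # slide's (a, b, continued) column plan; a rendering pass then slices the
-- # entries according to the plan.  Like A, it leaves `entries` empty on return.
-- def contentsList(section, entries, sectionAbbr):
--     if not entries:
--         return ""
--     PH = "    \\item[] \\phantom{1}\n"
--     # planning pass: simulate only the column-size state machine
--     plan = []
--     n = len(entries)
--     a, b = 9, 8
--     while n > 0:
--         if n < a + b:
--             a, b = (n + 1) // 2, n // 2
--         elif a + b < n < a + b + 4:
--             a, b = a - 1, b - 1
--         n -= min(a + b, n)
--         plan.append((a, b, n > 0))
--         a, b = 11, 10
--     # rendering pass: slice entries per plan, pad columns with phantoms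
--     parts = ["\\section{ " + sectionAbbr + " }\n\n",
--              "\\begin{frame}[t]{" + section + "}\n"]
--     idx = 0
--     for a, b, cont in plan:
--         parts.append("\\begin{columns}[t]\n\\column{0.05\\textwidth}\n\\column{0.45\\textwidth}\n")
--         parts.append("\\begin{itemize}\n")
--         col1 = entries[idx:idx + a]
--         idx += len(col1)
--         parts.extend(x + "\n" for x in col1)
--         parts.append(PH * (a - len(col1)))
--         parts.append(PH)
--         parts.append("\\end{itemize}\n\\column{0.45\\textwidth}\n\\begin{itemize}\n")
--         col2 = entries[idx:idx + b]
--         idx += len(col2)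
--         parts.extend(x + "\n" for x in col2)
--         parts.append(PH * (b - len(col2)))
--         if cont:
--             parts.append("    \\item[] \\textit{Continued on next slide...}\n")
--             parts.append("\\end{itemize}\n\\column{0.05\\textwidth}\n\\end{columns}\n")
--             parts.append("\\end{frame}\n\\begin{frame}[t]\n")
--         else:
--             parts.append(PH)
--     parts.append("\\end{itemize}\n\\column{0.05\\textwidth}\n")
--     parts.append("\\end{columns}\n\\end{frame}\n\n")
--     del entries[:]  # A consumes entries in place; keep that observable effect
--     return "".join(parts)
-- ===== Notes on version B (the rewrite author's own statement) =====
-- stated objective: faster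
-- what changed: A interleaves layout decisions with text emission in one while loop that pops entries one at a time from the front (quadratic list.pop(0)); B first runs a planning pass over the entry count producing each slide's (A,B,continued) column plan, then a rendering pass that walks the entries once with an index cursor, slicing each column and padding with repeated phantom strings; B also empties `entries` in place like A.
import Mathlib
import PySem

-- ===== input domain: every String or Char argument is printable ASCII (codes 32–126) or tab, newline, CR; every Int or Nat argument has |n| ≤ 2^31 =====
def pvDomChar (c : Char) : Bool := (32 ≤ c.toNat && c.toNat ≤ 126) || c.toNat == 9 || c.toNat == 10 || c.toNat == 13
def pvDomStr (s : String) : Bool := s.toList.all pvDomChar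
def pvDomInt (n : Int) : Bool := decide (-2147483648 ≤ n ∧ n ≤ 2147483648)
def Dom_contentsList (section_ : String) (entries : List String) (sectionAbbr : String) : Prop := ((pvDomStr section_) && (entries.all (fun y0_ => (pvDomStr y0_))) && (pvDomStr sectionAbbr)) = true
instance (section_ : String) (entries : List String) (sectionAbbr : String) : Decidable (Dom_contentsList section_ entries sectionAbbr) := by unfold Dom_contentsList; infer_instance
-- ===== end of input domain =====

-- B replaces A's pop-one-entry-at-a-time while loop (quadratic pop(0)) by a planning
-- pass over the entry COUNT (each slide's column sizes and 'continued' flag) followed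
-- by a linear rendering pass that slices entries with an index cursor (objective:
-- faster, measured). Side effects: A empties `entries` in
-- place; B reproduces that; the theorems are about the RETURN value.

-- ===== PORT A =====
def pvPh : String := "    \\item[] \\phantom{1}\n"

-- 'for entry in range(K): if e: text+=e.pop(0)+"\n" else: text+=phantom'
def pvFillCol : Nat → List String → String → List String × String
  | 0, e, t => (e, t)
  | k+1, e, t =>
    match e with
    | x :: r => pvFillCol k r (t ++ x ++ "\n")
    | [] => pvFillCol k [] (t ++ pvPh)

-- A's 'while e:' loop; fuel = initial length of e suffices since every iteration pops
-- at least one entry (running out of fuel returns text, as the loop does on empty e).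
-- int((len(e)+1)/2) and int(len(e)/2) act on nonnegative values, where Python's
-- truncating int(x/2) coincides with floor division PySem.Int.floordiv.
def pvALoop : Nat → List String → Int → Int → String → String
  | 0, _, _, _, t => t
  | fuel+1, e, a, b, t =>
    if e.isEmpty then t
    else
      let t := t ++ "\\begin{columns}[t]\n\\column{0.05\\textwidth}\n\\column{0.45\\textwidth}\n"
      let t := t ++ "\\begin{itemize}\n"
      let n : Int := e.length
      let ab : Int × Int :=
        if n < a + b then (PySem.Int.floordiv (n+1) 2, PySem.Int.floordiv n 2)
        else if a + b < n ∧ n < a + b + 4 then (a - 1, b - 1)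
        else (a, b)
      let p1 := pvFillCol ab.1.toNat e t
      let t := p1.2 ++ pvPh ++ "\\end{itemize}\n"
      let t := t ++ "\\column{0.45\\textwidth}\n"
      let t := t ++ "\\begin{itemize}\n"
      let p2 := pvFillCol ab.2.toNat p1.1 t
      if p2.1.isEmpty then
        pvALoop fuel p2.1 11 10 (p2.2 ++ pvPh)
      else
        pvALoop fuel p2.1 11 10
          (p2.2 ++ "    \\item[] \\textit{Continued on next slide...}\n"
            ++ "\\end{itemize}\n\\column{0.05\\textwidth}\n\\end{columns}\n"
            ++ "\\end{frame}\n\\begin{frame}[t]\n")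

def contentsList (section_ : String) (entries : List String) (sectionAbbr : String) : String :=
  if entries.length == 0 then ""
  else
    let t := "\\section{ " ++ sectionAbbr ++ " }\n\n"
    let t := t ++ "\\begin{frame}[t]{" ++ section_ ++ "}\n"
    let t := pvALoop entries.length entries 9 8 t
    let t := t ++ "\\end{itemize}\n\\column{0.05\\textwidth}\n"
    t ++ "\\end{columns}\n\\end{frame}\n\n"

-- ===== PORT B =====
-- planning pass: B's 'while n > 0' loop over the count only; fuel = the initial count
-- suffices since n drops by at least one per iteration.
def pvPlanLoop : Nat → Int → Int → Int → List (Int × Int × Bool)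
  | 0, _, _, _ => []
  | fuel+1, n, a, b =>
    if n ≤ 0 then []
    else
      let ab : Int × Int :=
        if n < a + b then (PySem.Int.floordiv (n+1) 2, PySem.Int.floordiv n 2)
        else if a + b < n ∧ n < a + b + 4 then (a - 1, b - 1)
        else (a, b)
      let n' := n - min (ab.1 + ab.2) n
      (ab.1, ab.2, decide (0 < n')) :: pvPlanLoop fuel n' 11 10

-- PH * k (k ≥ 0 along the plan, so only the nonnegative repeat is needed)
def pvPhRep : Nat → String
  | 0 => ""
  | k+1 => pvPh ++ pvPhRep k

-- parts.extend(x + "\n" for x in col)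
def pvEmitAll : List String → String
  | [] => ""
  | x :: r => x ++ "\n" ++ pvEmitAll r

-- rendering pass: an index cursor walks the fixed entries list; entries[idx:idx+a]
-- is PySem.List.slice (exact Python slice semantics).
def pvRenderLoop (entries : List String) : List (Int × Int × Bool) → Int → String → String
  | [], _, t => t
  | (a, b, cont) :: ps, idx, t =>
    let t := t ++ "\\begin{columns}[t]\n\\column{0.05\\textwidth}\n\\column{0.45\\textwidth}\n"
    let t := t ++ "\\begin{itemize}\n"
    let col1 := PySem.List.slice entries (some idx) (some (idx + a))
    let idx := idx + col1.length
    let t := t ++ pvEmitAll col1 ++ pvPhRep (a - col1.length).toNat ++ pvPh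
    let t := t ++ "\\end{itemize}\n\\column{0.45\\textwidth}\n\\begin{itemize}\n"
    let col2 := PySem.List.slice entries (some idx) (some (idx + b))
    let idx := idx + col2.length
    let t := t ++ pvEmitAll col2 ++ pvPhRep (b - col2.length).toNat
    let t :=
      if cont then
        t ++ "    \\item[] \\textit{Continued on next slide...}\n"
          ++ "\\end{itemize}\n\\column{0.05\\textwidth}\n\\end{columns}\n"
          ++ "\\end{frame}\n\\begin{frame}[t]\n"
      else t ++ pvPh
    pvRenderLoop entries ps idx t

def contentsList_alt (section_ : String) (entries : List String) (sectionAbbr : String) : String :=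
  if entries.isEmpty then ""
  else
    let plan := pvPlanLoop entries.length (entries.length : Int) 9 8
    let t := "\\section{ " ++ sectionAbbr ++ " }\n\n"
    let t := t ++ "\\begin{frame}[t]{" ++ section_ ++ "}\n"
    let t := pvRenderLoop entries plan 0 t
    let t := t ++ "\\end{itemize}\n\\column{0.05\\textwidth}\n"
    t ++ "\\end{columns}\n\\end{frame}\n\n"

-- ===== PRECONDITION & SPEC =====
def Spec_contentsList (section_ : String) (entries : List String) (sectionAbbr : String) (out : String) : Prop := out = contentsList_alt section_ entries sectionAbbr
instance (section_ : String) (entries : List String) (sectionAbbr : String) (out : String) : Decidable (Spec_contentsList section_ entries sectionAbbr out) := by unfold Spec_contentsList; infer_instance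

-- ===== CLAIM (what is proved, stated in full; the proofs are below) =====
def Claim_equal_contentsList : Prop := ∀ (section_ : String) (entries : List String) (sectionAbbr : String), Dom_contentsList section_ entries sectionAbbr → Spec_contentsList section_ entries sectionAbbr (contentsList section_ entries sectionAbbr)

-- ===== LEMMAS AND PROOFS =====

-- A's per-column pop loop produces exactly B's slice, emitted entries, and phantom pad.
theorem pvFillCol_eq (k : Nat) : ∀ (e : List String) (t : String),
    pvFillCol k e t = (e.drop k, t ++ pvEmitAll (e.take k) ++ pvPhRep (k - (e.take k).length)) := by
  induction k with
  | zero => intro e t; simp [pvFillCol, pvEmitAll, pvPhRep]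
  | succ k ih =>
    intro e t
    cases e with
    | nil =>
      simp [pvFillCol, ih, pvEmitAll, pvPhRep, String.append_assoc]
    | cons x r =>
      simp [pvFillCol, ih, pvEmitAll, String.append_assoc]

theorem pvALoop_nil (f : Nat) (a b : Int) (t : String) : pvALoop f [] a b t = t := by
  cases f <;> simp [pvALoop]

theorem pvPlanLoop_nonpos (f : Nat) (a b : Int) {n : Int} (h : n ≤ 0) :
    pvPlanLoop f n a b = [] := by
  cases f <;> simp [pvPlanLoop, h]

theorem drop_min_self {α : Type} (l : List α) (j : Nat) :
    l.drop (min j l.length) = l.drop j := by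
  rcases Nat.le_total j l.length with h | h
  · rw [Nat.min_eq_left h]
  · rw [Nat.min_eq_right h, List.drop_length, List.drop_eq_nil_of_le h]

theorem pvLoop_eq : ∀ (fuel : Nat) (L : List String) (k : Nat) (a b : Int) (t : String),
    1 ≤ a → 1 ≤ b →
    pvALoop fuel (L.drop k) a b t
      = pvRenderLoop L (pvPlanLoop fuel (((L.drop k).length : Nat) : Int) a b) (k : Int) t := by
  intro fuel
  induction fuel with
  | zero => intro L k a b t _ _; simp [pvALoop, pvPlanLoop, pvRenderLoop]
  | succ f ih =>
    intro L k a b t ha hb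
    by_cases he : L.drop k = []
    · rw [he, pvALoop_nil, pvPlanLoop_nonpos _ a b (by simp), pvRenderLoop]
    · have hlen : 1 ≤ (L.drop k).length := List.length_pos_iff.mpr he
      have hn : ¬ (((L.drop k).length : Int) ≤ 0) := by omega
      have hfd : ∀ m : Int, PySem.Int.floordiv m 2 = m / 2 :=
        fun m => PySem.Int.floordiv_eq_ediv_of_pos (by norm_num)
      rw [pvALoop, pvPlanLoop]
      simp only [he, if_neg hn, List.isEmpty_iff, pvRenderLoop]
      generalize hab : (if (((L.drop k).length : Nat) : Int) < a + b then
          (PySem.Int.floordiv ((((L.drop k).length : Nat) : Int) + 1) 2,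
           PySem.Int.floordiv ((((L.drop k).length : Nat) : Int)) 2)
        else if a + b < (((L.drop k).length : Nat) : Int) ∧ (((L.drop k).length : Nat) : Int) < a + b + 4
          then (a - 1, b - 1)
        else (a, b)) = ab
      obtain ⟨a', b'⟩ := ab
      have hA : 0 ≤ a' ∧ 0 ≤ b' := by
        have h := hab
        simp only [hfd] at h
        split_ifs at h with h1 h2 <;> (injection h with h3 h4; constructor <;> omega)
      simp only [pvFillCol_eq]
      have hs1 : PySem.List.slice L (some (k : Int)) (some ((k : Int) + a'))
          = List.take a'.toNat (List.drop k L) := by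
        rw [show ((k : Int) + a') = ((k : Int) + (a'.toNat : Int)) from by
          have := hA.1; omega]
        exact PySem.List.slice_natCast_add L k a'.toNat
      rw [hs1]
      have hi2 : (k : Int) + ((List.take a'.toNat (List.drop k L)).length : Int)
          = ((k + (List.take a'.toNat (List.drop k L)).length : Nat) : Int) := by
        push_cast; ring
      rw [hi2]
      have hdrop1 : List.drop (k + (List.take a'.toNat (List.drop k L)).length) L
          = List.drop a'.toNat (List.drop k L) := by
        rw [← List.drop_drop, List.length_take, drop_min_self]
      have hs2 : PySem.List.slice L
            (some ((k + (List.take a'.toNat (List.drop k L)).length : Nat) : Int))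
            (some (((k + (List.take a'.toNat (List.drop k L)).length : Nat) : Int) + b'))
          = List.take b'.toNat (List.drop a'.toNat (List.drop k L)) := by
        rw [show (((k + (List.take a'.toNat (List.drop k L)).length : Nat) : Int) + b')
            = (((k + (List.take a'.toNat (List.drop k L)).length : Nat) : Int) + (b'.toNat : Int)) from by
          have := hA.2; omega]
        rw [PySem.List.slice_natCast_add, hdrop1]
      rw [hs2]
      have hi3 : ((k + (List.take a'.toNat (List.drop k L)).length : Nat) : Int)
            + ((List.take b'.toNat (List.drop a'.toNat (List.drop k L))).length : Int)
          = ((k + (List.take a'.toNat (List.drop k L)).length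
              + (List.take b'.toNat (List.drop a'.toNat (List.drop k L))).length : Nat) : Int) := by
        push_cast; ring
      rw [hi3]
      have hdrop2 : List.drop (k + (List.take a'.toNat (List.drop k L)).length
              + (List.take b'.toNat (List.drop a'.toNat (List.drop k L))).length) L
          = List.drop b'.toNat (List.drop a'.toNat (List.drop k L)) := by
        rw [← List.drop_drop, hdrop1, List.length_take, drop_min_self]
      have hc1 : a'.toNat - (List.take a'.toNat (List.drop k L)).length
          = (a' - ((List.take a'.toNat (List.drop k L)).length : Int)).toNat := by
        simp only [List.length_take]; omega
      have hc2 : b'.toNat - (List.take b'.toNat (List.drop a'.toNat (List.drop k L))).length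
          = (b' - ((List.take b'.toNat (List.drop a'.toNat (List.drop k L))).length : Int)).toNat := by
        simp only [List.length_take, List.length_drop]; omega
      have hlen2 : ((((L.drop k).drop a'.toNat).drop b'.toNat).length : Int)
          = (((L.drop k).length : Nat) : Int) - min (a' + b') (((L.drop k).length : Nat) : Int) := by
        simp only [List.length_drop]; omega
      have hmid : ∀ x : String, "\\end{itemize}\n" ++ ("\\column{0.45\\textwidth}\n" ++ ("\\begin{itemize}\n" ++ x))
          = "\\end{itemize}\n\\column{0.45\\textwidth}\n\\begin{itemize}\n" ++ x := by
        intro x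
        rw [← String.append_assoc, ← String.append_assoc]
        rfl
      by_cases hdone : ((L.drop k).drop a'.toNat).drop b'.toNat = []
      · have h0 : (((L.drop k).drop a'.toNat).drop b'.toNat).length = 0 := by rw [hdone]; rfl
        have hnp : (((L.drop k).length : Nat) : Int)
            - min (a' + b') (((L.drop k).length : Nat) : Int) ≤ 0 := by omega
        have hcont : decide (0 < (((L.drop k).length : Nat) : Int)
            - min (a' + b') (((L.drop k).length : Nat) : Int)) = false := by
          simp only [decide_eq_false_iff_not]; omega
        simp only [if_false, hdone, pvALoop_nil, pvPlanLoop_nonpos f 11 10 hnp, pvRenderLoop,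
          hcont, Bool.false_eq_true, hc1, hc2, String.append_assoc, if_true, hmid]
      · have hp : 0 < (((L.drop k).drop a'.toNat).drop b'.toNat).length :=
          List.length_pos_iff.mpr hdone
        have hnp : 0 < (((L.drop k).length : Nat) : Int)
            - min (a' + b') (((L.drop k).length : Nat) : Int) := by omega
        have hcont : decide (0 < (((L.drop k).length : Nat) : Int)
            - min (a' + b') (((L.drop k).length : Nat) : Int)) = true := by
          simpa using hnp
        rw [if_neg hdone, ← hdrop2,
          ih L (k + (List.take a'.toNat (List.drop k L)).length
              + (List.take b'.toNat (List.drop a'.toNat (List.drop k L))).length) 11 10 _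
            (by norm_num) (by norm_num),
          hdrop2, hlen2]
        simp only [if_false, hcont, if_true, hc1, hc2]
        congr 1
        simp only [String.append_assoc, hmid]

theorem contentsList_spec : Claim_equal_contentsList := by
  intro section_ entries sectionAbbr _
  unfold Spec_contentsList contentsList contentsList_alt
  cases entries with
  | nil => rfl
  | cons x r =>
    simp only [List.length_cons, List.isEmpty_cons, beq_iff_eq, Nat.succ_ne_zero, if_false]
    have h := pvLoop_eq ((x :: r).length) (x :: r) 0 9 8
      ("\\section{ " ++ sectionAbbr ++ " }\n\n" ++ "\\begin{frame}[t]{" ++ section_ ++ "}\n")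
      (by norm_num) (by norm_num)
    simp only [List.drop_zero, Nat.cast_zero, List.length_cons] at h
    rw [h]
    simp
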